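-- pv_equiv track=rewrite | github.com/inmonim/algorithm | 프로그래머스/2/87946. 피로도/피로도.py | solution
-- ===== SOURCE A (Python) =====
-- from itertools import permutations
--
-- def solution(k, dungeons):
--     l = list(range(len(dungeons)))
--     permu = set(permutations(l))
--
--     answer = 0
--     for p in permu:
--         x = k
--         cnt = 0
--         for i in p:
--             if x >= dungeons[i][0]:
--                 x -= dungeons[i][1]
--                 cnt += 1
--             else:
--                 break
--         answer = max([answer, cnt])
--
--     return answer
-- ===== SOURCE B (Python) =====
-- def solution(k, dungeons):
--     # Depth-first backtracking: try each still-available dungeon that is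
--     # feasible now, recurse on the rest; prunes infeasible orders instead of
--     # enumerating (and materialising) all permutations like A does.
--     best = 0
--     for i in range(len(dungeons)):
--         req, fat = dungeons[i]
--         if k >= req:
--             best = max(best, 1 + solution(k - fat, dungeons[:i] + dungeons[i + 1:]))
--     return best
-- ===== Notes on version B (the rewrite author's own statement) =====
-- stated objective: alternative
-- what changed: B replaces A's materialisation of the full set of n! index permutations (each replayed greedily) with depth-first backtracking that recurses only on dungeons that are feasible now, skipping every order with an infeasible prefix; worst case (everything feasible) it still explores factorially many orders, so no speed is claimed.
import Mathlib
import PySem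

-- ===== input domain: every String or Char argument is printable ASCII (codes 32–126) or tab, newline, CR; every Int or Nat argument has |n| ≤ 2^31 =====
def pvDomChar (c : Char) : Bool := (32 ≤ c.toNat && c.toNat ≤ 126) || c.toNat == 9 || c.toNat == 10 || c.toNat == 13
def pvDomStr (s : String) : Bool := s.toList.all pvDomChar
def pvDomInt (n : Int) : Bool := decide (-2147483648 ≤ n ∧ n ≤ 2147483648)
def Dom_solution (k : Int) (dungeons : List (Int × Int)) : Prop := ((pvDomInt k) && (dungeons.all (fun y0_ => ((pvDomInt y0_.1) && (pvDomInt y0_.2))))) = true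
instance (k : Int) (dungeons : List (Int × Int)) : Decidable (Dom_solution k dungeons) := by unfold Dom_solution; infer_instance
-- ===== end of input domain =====

-- B is a different algorithm (depth-first backtracking over the remaining dungeons
-- instead of A's enumeration of the full permutation set); same return value everywhere.

-- ===== PORT A =====
-- itertools.permutations, ported by hand: for each position j (in order), yield
-- l[j] followed by each permutation of l with position j removed; base case [()].
-- permsPicks l = [(l[j], l without position j) for j in range(len(l))], in order.
def permsPicks {α : Type} : List α → List (α × List α)
  | [] => []
  | x :: xs => (x, xs) :: (permsPicks xs).map (fun yr => (yr.1, x :: yr.2))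

theorem permsPicks_snd_length {α : Type} : ∀ (l : List α) (yr : α × List α),
    yr ∈ permsPicks l → yr.2.length + 1 = l.length := by
  intro l
  induction l with
  | nil => intro yr h; simp [permsPicks] at h
  | cons x xs ih =>
    intro yr h
    simp only [permsPicks, List.mem_cons, List.mem_map] at h
    rcases h with h | ⟨zr, hz, rfl⟩
    · subst h; simp
    · have := ih zr hz; simp_all

def permsP {α : Type} : List α → List (List α)
  | [] => [[]]
  | x :: xs =>
    (permsPicks (x :: xs)).attach.flatMap (fun yr => (permsP yr.1.2).map (yr.1.1 :: ·))
termination_by l => l.length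
decreasing_by
  have := permsPicks_snd_length (x :: xs) yr.1 yr.2
  simp at this ⊢; omega

-- inner loop of A: walk the permutation p of indices, clearing while feasible,
-- 'break' on the first infeasible dungeon.  (the 'none' arm is unreachable from
-- 'solution': every index comes from range(len(dungeons)))
def innerA (dungeons : List (Int × Int)) : Int → Int → List Int → Int
  | _, cnt, [] => cnt
  | x, cnt, i :: rest =>
    match PySem.List.pyGet? dungeons i with
    | some d => if x ≥ d.1 then innerA dungeons (x - d.2) (cnt + 1) rest else cnt
    | none => cnt

def solution (k : Int) (dungeons : List (Int × Int)) : Int :=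
  let l := PySem.List.pyRange 0 (dungeons.length : Int) 1
  let permu : PySem.Set (List Int) := PySem.Set.ofList (permsP l)
  permu.foldl (fun answer p => max answer (innerA dungeons k 0 p)) 0

-- ===== PORT B =====
-- Source B: for i in range(len(dungeons)): if feasible, recurse on
-- dungeons[:i] + dungeons[i+1:].  'pre' is dungeons[:i], 'post' is dungeons[i:].
mutual
def solution_alt (k : Int) (dungeons : List (Int × Int)) : Int :=
  altGo k [] dungeons 0
termination_by (dungeons.length, dungeons.length + 1)

def altGo (k : Int) (pre post : List (Int × Int)) (best : Int) : Int :=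
  match post with
  | [] => best
  | d :: post' =>
    let best' := if k ≥ d.1 then max best (1 + solution_alt (k - d.2) (pre ++ post')) else best
    altGo k (pre ++ [d]) post' best'
termination_by (pre.length + post.length, post.length)
decreasing_by
  · simp; omega
  · simp; omega
end

-- ===== PRECONDITION & SPEC =====
def Spec_solution (k : Int) (dungeons : List (Int × Int)) (out : Int) : Prop := out = solution_alt k dungeons
instance (k : Int) (dungeons : List (Int × Int)) (out : Int) : Decidable (Spec_solution k dungeons out) := by unfold Spec_solution; infer_instance

-- ===== CLAIM (what is proved, stated in full; the proofs are below) =====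
def Claim_equal_solution : Prop := ∀ (k : Int) (dungeons : List (Int × Int)), Dom_solution k dungeons → Spec_solution k dungeons (solution k dungeons)

-- ===== LEMMAS AND PROOFS =====

-- fold that takes a running max of h over a list
def foldMax {α : Type} (h : α → Int) (l : List α) (a : Int) : Int :=
  l.foldl (fun a x => max a (h x)) a

-- greedy prefix count along one fixed order of dungeons
def count : Int → List (Int × Int) → Int
  | _, [] => 0
  | x, d :: rest => if x ≥ d.1 then 1 + count (x - d.2) rest else 0

theorem count_nonneg : ∀ (x : Int) (ds : List (Int × Int)), 0 ≤ count x ds := by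
  intro x ds
  induction ds generalizing x with
  | nil => simp [count]
  | cons d rest ih =>
    simp only [count]
    split
    · have := ih (x - d.2); omega
    · omega

theorem foldMax_max {α : Type} (h : α → Int) (l : List α) :
    ∀ a b, foldMax h l (max a b) = max a (foldMax h l b) := by
  induction l with
  | nil => intro a b; simp [foldMax]
  | cons x t ih =>
    intro a b
    simp only [foldMax, List.foldl] at *
    rw [max_assoc, ih]

theorem foldMax_init_le {α : Type} (h : α → Int) (l : List α) :
    ∀ a, a ≤ foldMax h l a := by
  induction l with
  | nil => intro a; simp [foldMax]
  | cons x t ih =>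
    intro a
    simp only [foldMax, List.foldl] at *
    exact le_trans (le_max_left _ _) (ih _)

theorem foldMax_mem_le {α : Type} (h : α → Int) (l : List α) :
    ∀ a x, x ∈ l → h x ≤ foldMax h l a := by
  induction l with
  | nil => intro a x hx; simp at hx
  | cons y t ih =>
    intro a x hx
    rcases List.mem_cons.1 hx with rfl | hx
    · exact le_trans (le_max_right _ _) (foldMax_init_le h t _)
    · exact ih _ _ hx

theorem foldMax_cases {α : Type} (h : α → Int) (l : List α) :
    ∀ a, foldMax h l a = a ∨ ∃ x ∈ l, foldMax h l a = h x := by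
  induction l with
  | nil => intro a; left; simp [foldMax]
  | cons y t ih =>
    intro a
    rcases ih (max a (h y)) with heq | ⟨x, hx, heq⟩
    · simp only [foldMax, List.foldl] at *
      rcases max_cases a (h y) with ⟨h1, _⟩ | ⟨h1, _⟩
      · left; rw [heq, h1]
      · right; exact ⟨y, by simp, by rw [heq, h1]⟩
    · right; exact ⟨x, by simp [hx], heq⟩

theorem foldMax_congr_mem {α : Type} (h g : α → Int) (l : List α)
    (hc : ∀ x ∈ l, h x = g x) : ∀ a, foldMax h l a = foldMax g l a := by
  induction l with
  | nil => intro a; simp [foldMax]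
  | cons y t ih =>
    intro a
    simp only [foldMax, List.foldl] at *
    rw [hc y (by simp)]
    exact ih (fun x hx => hc x (by simp [hx])) _

-- same members ⇒ same running max
theorem foldMax_congr_set {α : Type} (h : α → Int) (l m : List α)
    (hm : ∀ x, x ∈ l ↔ x ∈ m) (a : Int) : foldMax h l a = foldMax h m a := by
  apply le_antisymm
  · rcases foldMax_cases h l a with heq | ⟨x, hx, heq⟩
    · rw [heq]; exact foldMax_init_le h m a
    · rw [heq]; exact foldMax_mem_le h m a x ((hm x).1 hx)
  · rcases foldMax_cases h m a with heq | ⟨x, hx, heq⟩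
    · rw [heq]; exact foldMax_init_le h l a
    · rw [heq]; exact foldMax_mem_le h l a x ((hm x).2 hx)

theorem foldMax_append {α : Type} (h : α → Int) (l m : List α) (a : Int) :
    foldMax h (l ++ m) a = foldMax h m (foldMax h l a) := by
  simp [foldMax, List.foldl_append]

theorem foldMax_map {α β : Type} (h : β → Int) (f : α → β) (l : List α) (a : Int) :
    foldMax h (l.map f) a = foldMax (fun x => h (f x)) l a := by
  simp [foldMax, List.foldl_map]

theorem foldMax_shift {α : Type} (g : α → Int) (c : Int) (l : List α) :
    ∀ a, foldMax (fun x => c + g x) l (c + a) = c + foldMax g l a := by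
  induction l with
  | nil => intro a; simp [foldMax]
  | cons y t ih =>
    intro a
    simp only [foldMax, List.foldl] at *
    rw [show max (c + a) (c + g y) = c + max a (g y) by omega, ih]

theorem foldMax_const_zero {α : Type} (l : List α) (a : Int) (ha : 0 ≤ a) :
    foldMax (fun _ => (0 : Int)) l a = a := by
  induction l with
  | nil => simp [foldMax]
  | cons y t ih => simpa [foldMax, List.foldl, max_eq_left ha] using ih

theorem foldMax_one_add {α : Type} (g : α → Int) (hg : ∀ x, 0 ≤ g x)
    (l : List α) (hl : l ≠ []) :
    foldMax (fun x => 1 + g x) l 0 = 1 + foldMax g l 0 := by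
  cases l with
  | nil => exact absurd rfl hl
  | cons q t =>
    simp only [foldMax, List.foldl]
    have h1 : max (0 : Int) (1 + g q) = 1 + g q := by have := hg q; omega
    have h2 : max (0 : Int) (g q) = g q := by have := hg q; omega
    rw [h1, h2]
    exact foldMax_shift g 1 t (g q)

-- picks facts
theorem permsPicks_sub {α : Type} : ∀ (l : List α) (yr : α × List α),
    yr ∈ permsPicks l → yr.1 ∈ l ∧ ∀ x ∈ yr.2, x ∈ l := by
  intro l
  induction l with
  | nil => intro yr h; simp [permsPicks] at h
  | cons y xs ih =>
    intro yr h
    simp only [permsPicks, List.mem_cons, List.mem_map] at h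
    rcases h with h | ⟨zr, hz, rfl⟩
    · subst h; exact ⟨by simp, fun x hx => by simp [hx]⟩
    · rcases ih zr hz with ⟨h1, h2⟩
      refine ⟨by simp [h1], fun x hx => ?_⟩
      rcases List.mem_cons.1 hx with rfl | hx
      · simp
      · simp [h2 x hx]

theorem permsPicks_map {α β : Type} (f : α → β) : ∀ (l : List α),
    permsPicks (l.map f) = (permsPicks l).map (fun yr => (f yr.1, yr.2.map f)) := by
  intro l
  induction l with
  | nil => simp [permsPicks]
  | cons x xs ih => simp [permsPicks, ih, List.map_map, Function.comp]

-- unfolding of permsP on a nonempty list, without 'attach'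
theorem permsP_cons {α : Type} (x : α) (xs : List α) :
    permsP (x :: xs) = (permsPicks (x :: xs)).flatMap (fun yr => (permsP yr.2).map (yr.1 :: ·)) := by
  rw [permsP]
  induction (permsPicks (x :: xs)) with
  | nil => simp
  | cons z t ih =>
    rw [List.attach_cons, List.flatMap_cons, List.flatMap_map]
    exact congrArg _ ih

theorem permsP_ne_nil {α : Type} : ∀ (l : List α), permsP l ≠ [] := by
  intro l
  induction l with
  | nil => simp [permsP]
  | cons x xs ih =>
    rw [permsP_cons]
    simp only [permsPicks, List.flatMap_cons, ne_eq, List.append_eq_nil_iff, List.map_eq_nil_iff]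
    intro ⟨h1, _⟩
    exact ih h1

theorem permsP_sub {α : Type} : ∀ (n : Nat) (l : List α), l.length ≤ n →
    ∀ p ∈ permsP l, ∀ x ∈ p, x ∈ l := by
  intro n
  induction n with
  | zero =>
    intro l hl p hp x hx
    rw [List.length_eq_zero_iff.1 (Nat.le_zero.1 hl)] at hp ⊢
    simp [permsP] at hp; subst hp; simp at hx
  | succ n ih =>
    intro l hl p hp x hx
    cases l with
    | nil => simp [permsP] at hp; subst hp; simp at hx
    | cons y ys =>
      rw [permsP_cons] at hp
      rcases List.mem_flatMap.1 hp with ⟨yr, hyr, hpm⟩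
      rcases List.mem_map.1 hpm with ⟨q, hq, rfl⟩
      rcases permsPicks_sub _ _ hyr with ⟨h1, h2⟩
      have hlen := permsPicks_snd_length _ _ hyr
      rcases List.mem_cons.1 hx with rfl | hx
      · exact h1
      · exact h2 x (ih yr.2 (by simp only [List.length_cons] at hl; simp only [List.length_cons] at hlen; omega) q hq x hx)

theorem permsP_map {α β : Type} (f : α → β) : ∀ (n : Nat) (l : List α), l.length ≤ n →
    permsP (l.map f) = (permsP l).map (List.map f) := by
  intro n
  induction n with
  | zero =>
    intro l hl
    rw [List.length_eq_zero_iff.1 (Nat.le_zero.1 hl)]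
    simp [permsP]
  | succ n ih =>
    intro l hl
    cases l with
    | nil => simp [permsP]
    | cons y ys =>
      rw [permsP_cons y, List.map_cons, permsP_cons (f y)]
      rw [show (f y :: List.map f ys) = List.map f (y :: ys) from rfl, permsPicks_map]
      rw [List.flatMap_map, List.map_flatMap]
      apply List.flatMap_congr
      intro yr hyr
      have hlen := permsPicks_snd_length _ _ hyr
      simp only [List.length_cons] at hl hlen
      rw [ih yr.2 (by omega)]
      simp [List.map_map, Function.comp]

-- main correspondence: B's dfs = running max of count over all permutations
theorem altGo_eq : ∀ (n : Nat), (∀ (k : Int) (ds : List (Int × Int)), ds.length < n →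
      solution_alt k ds = foldMax (count k) (permsP ds) 0) →
    ∀ (k : Int) (pre post : List (Int × Int)), pre.length + post.length = n →
    ∀ best, 0 ≤ best →
    altGo k pre post best =
      foldMax (count k)
        ((permsPicks post).flatMap (fun yr => (permsP (pre ++ yr.2)).map (yr.1 :: ·))) best := by
  intro n H k pre post
  induction post generalizing pre with
  | nil =>
    intro _ best _
    simp [altGo, permsPicks, foldMax]
  | cons d post' ih =>
    intro hn best hbest
    rw [altGo]
    simp only [permsPicks, List.flatMap_cons, List.flatMap_map]
    rw [foldMax_append, foldMax_map]
    have hfirst : foldMax (fun p => count k (d :: p)) (permsP (pre ++ post')) best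
        = if k ≥ d.1 then max best (1 + solution_alt (k - d.2) (pre ++ post')) else best := by
      by_cases hf : k ≥ d.1
      · rw [if_pos hf]
        have hcongr := foldMax_congr_mem (fun p => count k (d :: p))
          (fun p => 1 + count (k - d.2) p) (permsP (pre ++ post'))
          (fun p _ => by simp [count, hf])
        rw [hcongr]
        have h0 : best = max best 0 := by omega
        rw [h0, foldMax_max,
            foldMax_one_add (count (k - d.2)) (fun p => count_nonneg _ p) _ (permsP_ne_nil _),
            ← H (k - d.2) (pre ++ post') (by simp at hn ⊢; omega)]
        omega
      · rw [if_neg hf]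
        have hcongr := foldMax_congr_mem (fun p => count k (d :: p))
          (fun _ => (0 : Int)) (permsP (pre ++ post'))
          (fun p _ => by simp [count, hf])
        rw [hcongr, foldMax_const_zero _ _ hbest]
    rw [hfirst, ih (pre ++ [d]) (by simp at hn ⊢; omega) _ (by split_ifs with h <;> omega)]
    simp only [← List.append_cons]

theorem main_eq : ∀ (n : Nat) (k : Int) (ds : List (Int × Int)), ds.length ≤ n →
    solution_alt k ds = foldMax (count k) (permsP ds) 0 := by
  intro n
  induction n with
  | zero =>
    intro k ds hl
    rw [List.length_eq_zero_iff.1 (Nat.le_zero.1 hl)]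
    simp [solution_alt, altGo, permsP, foldMax, count]
  | succ n ih =>
    intro k ds hl
    cases ds with
    | nil => simp [solution_alt, altGo, permsP, foldMax, count]
    | cons y ys =>
      rw [solution_alt]
      rw [altGo_eq (y :: ys).length
          (fun k' ds' h => ih k' ds' (by simp only [List.length_cons] at hl h; omega)) k [] (y :: ys) (by simp) 0 le_rfl]
      rw [permsP_cons]
      simp only [List.nil_append]

-- A's inner loop equals count along the looked-up dungeons
theorem innerA_eq_count (dungeons : List (Int × Int)) :
    ∀ (p : List Int) (x cnt : Int), (∀ i ∈ p, 0 ≤ i ∧ i < (dungeons.length : Int)) →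
    innerA dungeons x cnt p =
      cnt + count x (p.map (fun i => PySem.List.pyGetD dungeons i (0, 0))) := by
  intro p
  induction p with
  | nil => intro x cnt _; simp [innerA, count]
  | cons i rest ih =>
    intro x cnt hv
    have hi := hv i (by simp)
    obtain ⟨m, rfl⟩ : ∃ m : Nat, i = (m : Int) := ⟨i.toNat, by omega⟩
    have hm : m < dungeons.length := by
      have := hi.2
      omega
    rw [innerA, PySem.List.pyGet?_natCast, List.getElem?_eq_getElem hm]
    simp only [List.map_cons, count, PySem.List.pyGetD_natCast,
      List.getD_eq_getElem?_getD, List.getElem?_eq_getElem hm, Option.getD_some]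
    by_cases hf : x ≥ (dungeons[m]).1
    · rw [if_pos hf, if_pos hf, ih _ _ (fun j hj => hv j (by simp [hj]))]
      omega
    · rw [if_neg hf, if_neg hf]
      omega

-- ===== VERDICT (by name: the statement is the Claim_ definition above) =====
theorem solution_spec : Claim_equal_solution := by
  intro k dungeons _
  unfold Spec_solution solution
  simp only []
  set g : Int → Int × Int := fun i => PySem.List.pyGetD dungeons i (0, 0) with hgdef
  set idx : List Int := PySem.List.pyRange 0 (dungeons.length : Int) 1 with hidx
  have h1 : (PySem.Set.ofList (permsP idx)).foldl
      (fun answer p => max answer (innerA dungeons k 0 p)) 0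
      = foldMax (fun p => innerA dungeons k 0 p) (PySem.Set.ofList (permsP idx)) 0 := rfl
  rw [h1, foldMax_congr_set _ _ (permsP idx) (fun x => PySem.Set.mem_ofList _ x) 0]
  rw [foldMax_congr_mem (fun p => innerA dungeons k 0 p)
      (fun p => count k (p.map g)) (permsP idx)
      (fun p hp => by
        show innerA dungeons k 0 p = count k (p.map g)
        rw [innerA_eq_count dungeons p k 0
          (fun i hi => by
            have := permsP_sub idx.length idx le_rfl p hp i hi
            rw [hidx, PySem.List.mem_pyRange_one] at this
            exact this)]
        rw [← hgdef]
        omega) 0]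
  rw [← foldMax_map (count k) (List.map g) (permsP idx) 0]
  rw [← permsP_map g idx.length idx le_rfl]
  have hmap : idx.map g = dungeons := by
    rw [hidx, hgdef]
    exact PySem.List.map_pyGetD_pyRange_zero' dungeons (0, 0)
  rw [hmap, ← main_eq dungeons.length k dungeons le_rfl]
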